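-- pv_equiv track=rewrite | github.com/KorfLab/Suecica | DupHMM.py | cluster_group_assign_data_points
-- ===== SOURCE A (Python) =====
-- from collections import Counter, OrderedDict
-- from math import exp, factorial, log, lgamma, fabs
--
-- def cluster_group_assign_data_points(cluster_group, hist_dict, max_reads):
-- 	# This function groups data points to the appropriate cluster point and returns the data point-cluster point distance sum
--
-- 	data_count_dict = Counter({cluster: 0 for cluster in cluster_group})
-- 	optimum_cluster_dists = {cluster: [] for cluster in cluster_group} # Value = List containing (data point-cluster distance**2 * freq)
-- 	for data_point, freq in hist_dict.items():
-- 		# Cycle through each data point, finding which cluster point each is closest to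
-- 		# and storing (distance * freq) to that cluster's list of data points
-- 		min_cluster = -1												# Will hold closest cluster to data point. -1 is a default 'not assigned yet' value
-- 		min_cluster_dist = (int(fabs(data_point - cluster_group[0]))+2)**2+1	# Will hold closest cluster's distance from data point. Default is larger than 1st entry
-- 		for cluster_point in cluster_group:
-- 			data_cluster_dist = (int(fabs(data_point - cluster_point))+2)**2
-- 			if data_cluster_dist < min_cluster_dist:
-- 				min_cluster_dist = data_cluster_dist
-- 				min_cluster = cluster_point
-- 		optimum_cluster_dists[min_cluster].append(min_cluster_dist * freq)
-- 		data_count_dict[min_cluster] += freq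
--
-- 	# Sum up all the data point-cluster point distances for each cluster.
-- 	# This sum will be used as a 'fitness' value for this group of clusters.
-- 	dist_sum = 0
-- 	for cluster_point in cluster_group:
-- 		dist_sum += sum( [min_cluster_dist for min_cluster_dist in optimum_cluster_dists[cluster_point]] )
-- 	return(dist_sum, data_count_dict)
-- ===== SOURCE B (Python) =====
-- # B: sort the distinct cluster values once, binary-search each data point's two neighbours;
-- # first-occurrence tie-break kept via an index map. O((N+K) log K) instead of A's O(N*K).
-- from collections import Counter
--
-- def cluster_group_assign_data_points(cluster_group, hist_dict, max_reads):
-- 	first_idx = {}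
-- 	for c in cluster_group:
-- 		if c not in first_idx:
-- 			first_idx[c] = len(first_idx)
-- 	vals = sorted(first_idx)
-- 	sums = {c: 0 for c in first_idx}
-- 	counts = Counter(sums)
-- 	for data_point, freq in hist_dict.items():
-- 		# leftmost position with vals[pos] >= data_point (hand-rolled bisect_left)
-- 		lo, hi = 0, len(vals)
-- 		while lo < hi:
-- 			mid = (lo + hi) // 2
-- 			if vals[mid] < data_point:
-- 				lo = mid + 1
-- 			else:
-- 				hi = mid
-- 		cands = []
-- 		if lo < len(vals):
-- 			cands.append(vals[lo])
-- 		if lo > 0: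
-- 			cands.append(vals[lo - 1])
-- 		best = min(cands, key=lambda c: (abs(data_point - c), first_idx[c]))
-- 		sums[best] += (abs(data_point - best) + 2) ** 2 * freq
-- 		counts[best] += freq
-- 	dist_sum = sum(sums[c] for c in cluster_group)
-- 	return (dist_sum, counts)
-- ===== Notes on version B (the rewrite author's own statement) =====
-- stated objective: faster
-- what changed: A scans every cluster point for every data point; B sorts the distinct cluster values once and binary-searches the two neighbours of each data point, keeping A's first-in-cluster_group tie-break via a first-occurrence index map and accumulating per-cluster sums instead of per-cluster lists.
import Mathlib
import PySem

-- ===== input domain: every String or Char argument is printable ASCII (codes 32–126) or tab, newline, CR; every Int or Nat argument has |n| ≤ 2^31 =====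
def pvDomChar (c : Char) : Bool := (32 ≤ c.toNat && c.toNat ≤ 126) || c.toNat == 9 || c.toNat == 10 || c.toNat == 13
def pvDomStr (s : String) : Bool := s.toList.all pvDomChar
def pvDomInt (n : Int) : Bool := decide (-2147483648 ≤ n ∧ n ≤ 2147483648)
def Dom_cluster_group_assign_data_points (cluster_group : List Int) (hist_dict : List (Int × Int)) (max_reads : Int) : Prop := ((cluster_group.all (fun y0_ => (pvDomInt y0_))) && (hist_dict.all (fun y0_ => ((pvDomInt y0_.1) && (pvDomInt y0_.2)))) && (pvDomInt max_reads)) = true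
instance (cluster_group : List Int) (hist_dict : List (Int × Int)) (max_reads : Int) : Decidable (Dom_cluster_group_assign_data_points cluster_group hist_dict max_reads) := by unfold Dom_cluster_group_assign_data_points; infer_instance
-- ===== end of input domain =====

-- B replaces A's inner scan over all clusters by one sort of the distinct cluster values plus a
-- binary search per data point (first-occurrence tie-break kept via an index map); measured speed
-- is reported, the equivalence below is about the return value.

-- ===== PORT A =====
-- (int(fabs(x)) + 2)**2 : exact as integer arithmetic for |x| < 2^53, which Dom guarantees
def pvDist (dp c : Int) : Int := (((dp - c).natAbs : Int) + 2) ^ 2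

-- A's inner `for cluster_point in cluster_group` scan; init value uses cluster_group[0]
-- (Python raises IndexError on an empty cluster_group there — excluded by Pre_ when the loop runs)
def pvScanA (cluster_group : List Int) (dp : Int) : Int × Int :=
  cluster_group.foldl
    (fun m c => if pvDist dp c < m.2 then (c, pvDist dp c) else m)
    (-1, pvDist dp (cluster_group.headD 0) + 1)

def cluster_group_assign_data_points (cluster_group : List Int) (hist_dict : List (Int × Int)) (max_reads : Int) : Int × (List (Int × Int)) :=
  let data_count_dict : PySem.Dict Int Int :=
    cluster_group.foldl (fun d c => d.insert c 0) PySem.Dict.empty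
  let optimum_cluster_dists : PySem.Dict Int (List Int) :=
    cluster_group.foldl (fun d c => d.insert c []) PySem.Dict.empty
  let st := hist_dict.foldl
    (fun (st : PySem.Dict Int (List Int) × PySem.Dict Int Int) p =>
      let mc := pvScanA cluster_group p.1
      (st.1.insert mc.1 (st.1.getD mc.1 [] ++ [mc.2 * p.2]),
       st.2.modify mc.1 0 (· + p.2)))
    (optimum_cluster_dists, data_count_dict)
  let dist_sum := cluster_group.foldl (fun s c => s + (st.1.getD c []).sum) 0
  (dist_sum, st.2.items)

-- ===== PORT B =====
-- first_idx: first-occurrence index of each distinct cluster value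
def pvFirstIdx (cluster_group : List Int) : PySem.Dict Int Int :=
  cluster_group.foldl
    (fun d c => if d.contains c then d else d.insert c (d.size : Int))
    PySem.Dict.empty

-- Source B's hand-written while-loop is verbatim bisect_left, ported as PySem.List.bisectLeft;
-- then min over the ≤2 neighbour candidates with key (distance, first-occurrence index)
def pvChoose (vals : List Int) (fi : PySem.Dict Int Int) (dp : Int) : Int :=
  let lo := PySem.List.bisectLeft vals dp
  let cands := (if lo < vals.length then [vals.getD lo 0] else []) ++
               (if 0 < lo then [vals.getD (lo - 1) 0] else [])
  (PySem.List.min2? cands (fun c => (((dp - c).natAbs : Int))) (fun c => fi.getD c 0)).getD 0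

def cluster_group_assign_data_points_alt (cluster_group : List Int) (hist_dict : List (Int × Int)) (max_reads : Int) : Int × (List (Int × Int)) :=
  let fi := pvFirstIdx cluster_group
  let vals := PySem.List.sorted fi.keys (fun x => x)
  let sums : PySem.Dict Int Int :=
    fi.keys.foldl (fun d c => d.insert c 0) PySem.Dict.empty
  let counts : PySem.Dict Int Int := sums
  let st := hist_dict.foldl
    (fun (st : PySem.Dict Int Int × PySem.Dict Int Int) p =>
      let best := pvChoose vals fi p.1
      (st.1.insert best (st.1.getD best 0 + pvDist p.1 best * p.2),
       st.2.modify best 0 (· + p.2)))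
    (sums, counts)
  let dist_sum := cluster_group.foldl (fun s c => s + st.1.getD c 0) 0
  (dist_sum, st.2.items)

-- ===== PRECONDITION & SPEC =====
-- Pre_ excludes only the inputs where A raises: a non-empty hist_dict with an empty
-- cluster_group makes A's `cluster_group[0]` raise IndexError.
def Pre_cluster_group_assign_data_points (cluster_group : List Int) (hist_dict : List (Int × Int)) (max_reads : Int) : Prop :=
  hist_dict = [] ∨ cluster_group ≠ []
instance (cluster_group : List Int) (hist_dict : List (Int × Int)) (max_reads : Int) : Decidable (Pre_cluster_group_assign_data_points cluster_group hist_dict max_reads) := by unfold Pre_cluster_group_assign_data_points; infer_instance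

def pvWitness_cluster_group_assign_data_points : List Int × (List (Int × Int)) × Int := ([3, 7], [(1, 2), (6, 1)], 10)

def Spec_cluster_group_assign_data_points (cluster_group : List Int) (hist_dict : List (Int × Int)) (max_reads : Int) (out : Int × (List (Int × Int))) : Prop := out = cluster_group_assign_data_points_alt cluster_group hist_dict max_reads
instance (cluster_group : List Int) (hist_dict : List (Int × Int)) (max_reads : Int) (out : Int × (List (Int × Int))) : Decidable (Spec_cluster_group_assign_data_points cluster_group hist_dict max_reads out) := by unfold Spec_cluster_group_assign_data_points; infer_instance

-- ===== CLAIM (what is proved, stated in full; the proofs are below) =====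
def Claim_equal_cluster_group_assign_data_points : Prop := ∀ (cluster_group : List Int) (hist_dict : List (Int × Int)) (max_reads : Int), Dom_cluster_group_assign_data_points cluster_group hist_dict max_reads → Pre_cluster_group_assign_data_points cluster_group hist_dict max_reads → Spec_cluster_group_assign_data_points cluster_group hist_dict max_reads (cluster_group_assign_data_points cluster_group hist_dict max_reads)

-- ===== LEMMAS AND PROOFS =====

-- distance comparison transfers to |dp - c|
theorem pvDist_lt_iff (dp a b : Int) : pvDist dp a < pvDist dp b ↔ (dp - a).natAbs < (dp - b).natAbs := by
  unfold pvDist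
  generalize (dp - a).natAbs = x
  generalize (dp - b).natAbs = y
  constructor
  · intro h
    by_contra hc
    push_neg at hc
    have : (y : Int) ≤ (x : Int) := by exact_mod_cast hc
    nlinarith
  · intro h
    have : (x : Int) < (y : Int) := by exact_mod_cast h
    nlinarith

theorem pvDist_congr (dp a b : Int) (h : (dp - a).natAbs = (dp - b).natAbs) : pvDist dp a = pvDist dp b := by
  unfold pvDist; rw [h]

-- ---- A's scan: its result is the first element of cluster_group attaining the minimal distance ----
theorem scanA_aux (dp : Int) : ∀ (l : List Int) (m : Int),
    ∃ p1 p2, m :: l = p1 ++ (l.foldl (fun m c => if pvDist dp c < m.2 then (c, pvDist dp c) else m) (m, pvDist dp m)).1 :: p2 ∧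
      (l.foldl (fun m c => if pvDist dp c < m.2 then (c, pvDist dp c) else m) (m, pvDist dp m)).2 =
        pvDist dp (l.foldl (fun m c => if pvDist dp c < m.2 then (c, pvDist dp c) else m) (m, pvDist dp m)).1 ∧
      (∀ c ∈ p1, pvDist dp (l.foldl (fun m c => if pvDist dp c < m.2 then (c, pvDist dp c) else m) (m, pvDist dp m)).1 < pvDist dp c) ∧
      (∀ c ∈ p2, pvDist dp (l.foldl (fun m c => if pvDist dp c < m.2 then (c, pvDist dp c) else m) (m, pvDist dp m)).1 ≤ pvDist dp c) := by
  intro l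
  induction l with
  | nil => intro m; exact ⟨[], [], by simp⟩
  | cons c l ih =>
    intro m
    by_cases h : pvDist dp c < pvDist dp m
    · obtain ⟨q1, q2, hsp, hd, hs, hle⟩ := ih c
      rw [List.foldl_cons, if_pos h] at *
      refine ⟨m :: q1, q2, by simpa using hsp, hd, ?_, hle⟩
      intro x hx
      rcases List.mem_cons.mp hx with rfl | hx
      · -- f r.1 < f m since r.1 is c or in q1
        rcases q1 with _ | ⟨a, q1'⟩
        · simp at hsp
          rw [← hsp.1]; exact h
        · have ha : a = c := by simpa using (congrArg (fun t => t.headD 0) hsp).symm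
          have := hs a (by simp)
          rw [ha] at this
          exact this.trans h
      · exact hs x hx
    · obtain ⟨q1, q2, hsp, hd, hs, hle⟩ := ih m
      rw [List.foldl_cons, if_neg h] at *
      push_neg at h
      rcases q1 with _ | ⟨a, q1'⟩
      · simp at hsp
        refine ⟨[], c :: l, ?_, hd, by simp, ?_⟩
        · simp [← hsp.1]
        · intro x hx
          rcases List.mem_cons.mp hx with rfl | hx
          · rw [← hsp.1]; exact h
          · exact hle x (hsp.2 ▸ hx)
      · have ha : a = m := by simpa using (congrArg (fun t => t.headD 0) hsp).symm
        subst ha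
        have htail : l = q1' ++ (List.foldl (fun m c => if pvDist dp c < m.2 then (c, pvDist dp c) else m) (a, pvDist dp a) l).1 :: q2 := by
          rw [List.cons_append] at hsp
          exact (List.cons_eq_cons.mp hsp).2
        have hsm := hs a (by simp)
        refine ⟨a :: c :: q1', q2, by exact congrArg (fun t => a :: c :: t) htail, hd, ?_, hle⟩
        intro x hx
        rcases List.mem_cons.mp hx with rfl | hx
        · exact hsm
        rcases List.mem_cons.mp hx with rfl | hx
        · exact lt_of_lt_of_le hsm h
        · exact hs x (by simp [hx])

theorem scanA_spec (dp c0 : Int) (rest : List Int) :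
    ∃ p1 p2, c0 :: rest = p1 ++ (pvScanA (c0 :: rest) dp).1 :: p2 ∧
      (pvScanA (c0 :: rest) dp).2 = pvDist dp (pvScanA (c0 :: rest) dp).1 ∧
      (∀ c ∈ p1, pvDist dp (pvScanA (c0 :: rest) dp).1 < pvDist dp c) ∧
      (∀ c ∈ p2, pvDist dp (pvScanA (c0 :: rest) dp).1 ≤ pvDist dp c) := by
  have h0 : pvScanA (c0 :: rest) dp =
      rest.foldl (fun m c => if pvDist dp c < m.2 then (c, pvDist dp c) else m) (c0, pvDist dp c0) := by
    unfold pvScanA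
    simp
  rw [h0]
  exact scanA_aux dp rest c0

-- ---- PySem.Set.update appends fresh elements ----
theorem set_update_shape : ∀ (l : List Int) (S : PySem.Set Int),
    ∃ t, PySem.Set.update S l = S ++ t ∧ ∀ c ∈ t, c ∈ l ∧ c ∉ S := by
  intro l
  induction l with
  | nil => intro S; exact ⟨[], by simp [PySem.Set.update]⟩
  | cons c l ih =>
    intro S
    by_cases h : c ∈ S
    · have hc : PySem.Set.add S c = S := by
        simp [PySem.Set.add, PySem.Set.contains, h]
      have : PySem.Set.update S (c :: l) = PySem.Set.update S l := by
        simp [PySem.Set.update, hc]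
      rw [this]
      obtain ⟨t, ht, hp⟩ := ih S
      exact ⟨t, ht, fun x hx => ⟨by simp [(hp x hx).1], (hp x hx).2⟩⟩
    · have hc : PySem.Set.add S c = S ++ [c] := by
        simp [PySem.Set.add, PySem.Set.contains, h]
      have h2 : PySem.Set.update S (c :: l) = PySem.Set.update (S ++ [c]) l := by
        simp [PySem.Set.update, hc]
      rw [h2]
      obtain ⟨t, ht, hp⟩ := ih (S ++ [c])
      refine ⟨c :: t, by simp [ht], ?_⟩
      intro x hx
      rcases List.mem_cons.mp hx with rfl | hx
      · exact ⟨by simp, h⟩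
      · have := hp x hx
        simp at this
        exact ⟨by simp [this.1], this.2.1⟩

theorem set_update_disjoint : ∀ (l : List Int) (S : PySem.Set Int),
    l.Nodup → (∀ c ∈ l, c ∉ S) → PySem.Set.update S l = S ++ l := by
  intro l
  induction l with
  | nil => intro S _ _; simp [PySem.Set.update]
  | cons c l ih =>
    intro S hnd hdis
    have hc : PySem.Set.add S c = S ++ [c] := by
      simp [PySem.Set.add, PySem.Set.contains, hdis c (by simp)]
    have h2 : PySem.Set.update S (c :: l) = PySem.Set.update (S ++ [c]) l := by
      simp [PySem.Set.update, hc]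
    rw [h2, ih (S ++ [c]) (List.nodup_cons.mp hnd).2]
    · simp
    · intro x hx
      simp only [List.mem_append, List.mem_singleton]
      rintro (hxS | rfl)
      · exact hdis x (by simp [hx]) hxS
      · exact (List.nodup_cons.mp hnd).1 hx

theorem set_ofList_nodup_eq (l : List Int) (h : l.Nodup) : PySem.Set.ofList l = l := by
  have : PySem.Set.ofList l = PySem.Set.update [] l := rfl
  rw [this, set_update_disjoint l [] h (by simp)]
  simp

-- order of Set.ofList: splitting the input at the first occurrence of m splits the set at m
theorem set_ofList_split (p1 : List Int) (m : Int) (p2 : List Int) (hm : m ∉ p1) :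
    ∃ t, PySem.Set.ofList (p1 ++ m :: p2) = PySem.Set.ofList p1 ++ m :: t ∧
      ∀ c ∈ t, c ∈ p2 ∧ c ∉ p1 ∧ c ≠ m := by
  have h1 : PySem.Set.ofList (p1 ++ m :: p2) = PySem.Set.update (PySem.Set.ofList p1) (m :: p2) := by
    simp [PySem.Set.ofList, PySem.Set.update, List.foldl_append]
  have hm' : m ∉ PySem.Set.ofList p1 := by
    rw [PySem.Set.mem_ofList]; exact hm
  have h2 : PySem.Set.add (PySem.Set.ofList p1) m = PySem.Set.ofList p1 ++ [m] := by
    simp [PySem.Set.add, PySem.Set.contains, hm']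
  have h3 : PySem.Set.update (PySem.Set.ofList p1) (m :: p2) = PySem.Set.update (PySem.Set.ofList p1 ++ [m]) p2 := by
    simp [PySem.Set.update, h2]
  obtain ⟨t, ht, hp⟩ := set_update_shape p2 (PySem.Set.ofList p1 ++ [m])
  refine ⟨t, by rw [h1, h3, ht]; simp, ?_⟩
  intro c hc
  have := hp c hc
  simp [PySem.Set.mem_ofList] at this
  exact ⟨this.1, this.2.1, this.2.2⟩

-- ---- characterisation of pvFirstIdx ----
def pvWithIdx (V : List Int) : List (Int × Int) := V.zipIdx.map (fun p => (p.1, (p.2 : Int)))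

theorem pvFirstIdx_aux : ∀ (l : List Int) (d : PySem.Dict Int Int) (V : List Int),
    d.items = pvWithIdx V →
    (l.foldl (fun d c => if d.contains c then d else d.insert c (d.size : Int)) d).items =
      pvWithIdx (PySem.Set.update V l) := by
  intro l
  induction l with
  | nil => intro d V h; simpa [PySem.Set.update] using h
  | cons c l ih =>
    intro d V h
    have hkeys : d.keys = V := by
      show d.items.map Prod.fst = V
      rw [h]
      simp only [pvWithIdx, List.map_map]
      exact List.zipIdx_map_fst 0 V
    by_cases hc : c ∈ V
    · have hcont : d.contains c = true := (PySem.Dict.contains_iff_mem_keys d c).mpr (hkeys ▸ hc)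
      have hadd : PySem.Set.add V c = V := by
        simp [PySem.Set.add, hc]
      have hupd : PySem.Set.update V (c :: l) = PySem.Set.update V l := by
        simp [PySem.Set.update, hadd]
      rw [List.foldl_cons, if_pos hcont, hupd]
      exact ih d V h
    · have hcont : d.contains c = false := by
        rw [← Bool.not_eq_true]
        intro hcon
        exact hc (hkeys ▸ (PySem.Dict.contains_iff_mem_keys d c).mp hcon)
      have hadd : PySem.Set.add V c = V ++ [c] := by
        simp [PySem.Set.add]
        intro hcon
        exact absurd hcon hc
      have hupd : PySem.Set.update V (c :: l) = PySem.Set.update (V ++ [c]) l := by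
        simp [PySem.Set.update, hadd]
      rw [List.foldl_cons, if_neg (by simp [hcont]), hupd]
      apply ih
      rw [PySem.Dict.items_insert_of_not_contains d _ hcont, h]
      have hsz : d.size = V.length := by
        show d.items.length = V.length
        rw [h]; simp [pvWithIdx]
      rw [hsz]
      simp [pvWithIdx, List.zipIdx_append]

theorem pvFirstIdx_items (cg : List Int) :
    (pvFirstIdx cg).items = pvWithIdx (PySem.Set.ofList cg) := by
  have h := pvFirstIdx_aux cg PySem.Dict.empty [] (by rfl)
  simpa [pvFirstIdx, PySem.Set.ofList, PySem.Set.update] using h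

theorem pvFirstIdx_keys (cg : List Int) : (pvFirstIdx cg).keys = PySem.Set.ofList cg := by
  show (pvFirstIdx cg).items.map Prod.fst = PySem.Set.ofList cg
  rw [pvFirstIdx_items]
  simp only [pvWithIdx, List.map_map]
  exact List.zipIdx_map_fst 0 _

theorem pvFirstIdx_getD (cg : List Int) (x1 : List Int) (x : Int) (x2 : List Int)
    (h : PySem.Set.ofList cg = x1 ++ x :: x2) :
    (pvFirstIdx cg).getD x 0 = (x1.length : Int) := by
  have hnodup : (pvFirstIdx cg).keys.Nodup := by
    rw [pvFirstIdx_keys]; exact PySem.Set.nodup_ofList cg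
  have hb : x1.length < (PySem.Set.ofList cg).length := by rw [h]; simp
  have hb2 : x1.length < ((PySem.Set.ofList cg).zipIdx).length := by simpa using hb
  have hget : ((PySem.Set.ofList cg).zipIdx)[x1.length]'hb2 = (x, x1.length) := by
    rw [List.getElem_zipIdx]
    rw [List.getElem_of_eq h]
    rw [List.getElem_append_right (le_refl x1.length)]
    simp
  have hmm : (x, (x1.length : Int)) ∈ (pvFirstIdx cg).items := by
    rw [pvFirstIdx_items]
    exact List.mem_map_of_mem (hget ▸ List.getElem_mem hb2)
  exact PySem.Dict.getD_of_mem_items _ hmm hnodup 0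

theorem min2?_fold_spec (k1 k2 : Int → Int) (f : Option Int → Int → Option Int)
    (hf : ∀ (m x : Int), f (some m) x =
      if (decide (k1 x < k1 m) || !decide (k1 m < k1 x) && decide (k2 x < k2 m)) = true then some x else some m) :
    ∀ (xs : List Int) (m : Int),
    ∃ b, (xs.foldl f (some m)) = some b ∧ b ∈ m :: xs ∧
      ∀ y ∈ m :: xs, k1 b < k1 y ∨ (k1 b = k1 y ∧ k2 b ≤ k2 y) := by
  intro xs
  induction xs with
  | nil =>
    intro m
    exact ⟨m, rfl, by simp, by intro y hy; simp at hy; subst hy; right; exact ⟨rfl, le_refl _⟩⟩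
  | cons x xs ih =>
    intro m
    rw [List.foldl_cons, hf m x]
    by_cases hb : (decide (k1 x < k1 m) || !decide (k1 m < k1 x) && decide (k2 x < k2 m)) = true
    · -- x strictly better than m
      have hxm : k1 x < k1 m ∨ (k1 x = k1 m ∧ k2 x ≤ k2 m) := by
        simp only [Bool.or_eq_true, Bool.and_eq_true, Bool.not_eq_eq_eq_not, Bool.not_true,
          decide_eq_true_eq, decide_eq_false_iff_not] at hb
        rcases hb with h1 | ⟨h1, h2⟩
        · exact Or.inl h1
        · rcases lt_or_ge (k1 x) (k1 m) with h3 | h3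
          · exact Or.inl h3
          · exact Or.inr ⟨by omega, le_of_lt h2⟩
      rw [if_pos hb]
      obtain ⟨b, heq, hmem, hlex⟩ := ih x
      refine ⟨b, heq, ?_, ?_⟩
      · rcases List.mem_cons.mp hmem with rfl | hmem
        · simp
        · simp [hmem]
      · intro y hy
        rcases List.mem_cons.mp hy with rfl | hy
        · -- y = m : b lexle x lexle m
          have hbx := hlex x (by simp)
          rcases hbx with h1 | ⟨h1, h2⟩ <;> rcases hxm with h3 | ⟨h3, h4⟩
          · exact Or.inl (h1.trans h3)
          · exact Or.inl (h3 ▸ h1)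
          · exact Or.inl (h1 ▸ h3)
          · exact Or.inr ⟨h1.trans h3, h2.trans h4⟩
        · exact hlex y hy
    · -- m stays
      have hmx : k1 m < k1 x ∨ (k1 m = k1 x ∧ k2 m ≤ k2 x) := by
        simp only [Bool.or_eq_true, Bool.and_eq_true, Bool.not_eq_eq_eq_not, Bool.not_true,
          decide_eq_true_eq, decide_eq_false_iff_not] at hb
        push_neg at hb
        obtain ⟨h1, h2⟩ := hb
        rcases lt_or_ge (k1 m) (k1 x) with h3 | h3
        · exact Or.inl h3
        · exact Or.inr ⟨by omega, h2 (by omega)⟩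
      rw [if_neg hb]
      obtain ⟨b, heq, hmem, hlex⟩ := ih m
      refine ⟨b, heq, ?_, ?_⟩
      · rcases List.mem_cons.mp hmem with rfl | hmem
        · simp
        · simp [hmem]
      · intro y hy
        rcases List.mem_cons.mp hy with rfl | hy
        · exact hlex y (by simp)
        rcases List.mem_cons.mp hy with rfl | hy
        · -- y = x : b lexle m lexle x
          have hbm := hlex m (by simp)
          rcases hbm with h1 | ⟨h1, h2⟩ <;> rcases hmx with h3 | ⟨h3, h4⟩
          · exact Or.inl (h1.trans h3)
          · exact Or.inl (h3 ▸ h1)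
          · exact Or.inl (h1 ▸ h3)
          · exact Or.inr ⟨h1.trans h3, h2.trans h4⟩
        · exact hlex y (by simp [hy])

theorem min2?_cons_spec (k1 k2 : Int → Int) (x : Int) (xs : List Int) :
    ∃ b, PySem.List.min2? (x :: xs) k1 k2 = some b ∧ b ∈ x :: xs ∧
      ∀ y ∈ x :: xs, k1 b < k1 y ∨ (k1 b = k1 y ∧ k2 b ≤ k2 y) := by
  simp only [PySem.List.min2?, List.foldl_cons]
  exact min2?_fold_spec k1 k2 _ (fun m x => rfl) xs x

-- ---- the chosen candidate equals A's scan winner ----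
theorem best_pick (dp m : Int) (fi : PySem.Dict Int Int) (U S1 t : List Int)
    (hU : U = S1 ++ m :: t)
    (hk : ∀ (x1 : List Int) (x : Int) (x2 : List Int), U = x1 ++ x :: x2 → fi.getD x 0 = (x1.length : Int))
    (hS1 : ∀ c ∈ S1, pvDist dp m < pvDist dp c)
    (ht : ∀ c ∈ t, pvDist dp m ≤ pvDist dp c)
    (cands : List Int) (hcne : cands ≠ [])
    (hsub : ∀ c ∈ cands, c ∈ U)
    (hdom : ∀ c ∈ U, c ∉ cands → ∃ a ∈ cands, (dp - a).natAbs < (dp - c).natAbs) :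
    (PySem.List.min2? cands (fun c => ((dp - c).natAbs : Int)) (fun c => fi.getD c 0)).getD 0 = m := by
  have hminU : ∀ c ∈ U, pvDist dp m ≤ pvDist dp c := by
    intro c hc
    rw [hU] at hc
    rcases List.mem_append.mp hc with hc | hc
    · exact le_of_lt (hS1 c hc)
    · rcases List.mem_cons.mp hc with rfl | hc
      · exact le_refl _
      · exact ht c hc
  have hmU : m ∈ U := by rw [hU]; simp
  have hmc : m ∈ cands := by
    by_contra hnc
    obtain ⟨a, ha, hlt⟩ := hdom m hmU hnc
    exact absurd (hminU a (hsub a ha)) (not_le.mpr ((pvDist_lt_iff dp a m).mpr hlt))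
  obtain ⟨c1, cr, rfl⟩ := List.exists_cons_of_ne_nil hcne
  obtain ⟨b, heq, hbmem, hblex⟩ := min2?_cons_spec (fun c => ((dp - c).natAbs : Int)) (fun c => fi.getD c 0) c1 cr
  rw [heq]
  show b = m
  have hbU : b ∈ U := hsub b hbmem
  rcases hblex m hmc with hlt | ⟨hkeq, hk2⟩
  · -- strictly closer than m: contradicts minimality of m over U
    have : (dp - b).natAbs < (dp - m).natAbs := by exact_mod_cast hlt
    exact absurd (hminU b hbU) (not_le.mpr ((pvDist_lt_iff dp b m).mpr this))
  · have habs : (dp - b).natAbs = (dp - m).natAbs := by exact_mod_cast hkeq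
    have hfeq : pvDist dp b = pvDist dp m := pvDist_congr dp b m habs
    rw [hU] at hbU
    rcases List.mem_append.mp hbU with hb1 | hb2
    · exact absurd (hS1 b hb1) (by rw [hfeq]; exact lt_irrefl _)
    rcases List.mem_cons.mp hb2 with rfl | hbt
    · rfl
    · -- b comes after m in U: its first-occurrence index is larger, contradicting k2 b ≤ k2 m
      obtain ⟨t1, t2, rfl⟩ := List.append_of_mem hbt
      have hkm : fi.getD m 0 = (S1.length : Int) := hk S1 m (t1 ++ b :: t2) hU
      have hkb : fi.getD b 0 = ((S1 ++ m :: t1).length : Int) := by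
        apply hk (S1 ++ m :: t1) b t2
        rw [hU]; simp
      rw [hkm, hkb] at hk2
      simp at hk2
      omega

theorem chooseEq (c0 : Int) (rest : List Int) (dp : Int) :
    pvChoose (PySem.List.sorted (pvFirstIdx (c0 :: rest)).keys (fun x => x)) (pvFirstIdx (c0 :: rest)) dp =
      (pvScanA (c0 :: rest) dp).1 := by
  obtain ⟨p1, p2, hsplit, hd2, hstrict, hle⟩ := scanA_spec dp c0 rest
  set m := (pvScanA (c0 :: rest) dp).1 with hm
  have hmp1 : m ∉ p1 := fun h => lt_irrefl _ (hstrict m h)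
  obtain ⟨t, hUeq, htp⟩ := set_ofList_split p1 m p2 hmp1
  have hU' : PySem.Set.ofList (c0 :: rest) = PySem.Set.ofList p1 ++ m :: t := by
    rw [hsplit, hUeq]
  have hS1f : ∀ c ∈ PySem.Set.ofList p1, pvDist dp m < pvDist dp c := fun c hc =>
    hstrict c ((PySem.Set.mem_ofList p1 c).mp hc)
  have htf : ∀ c ∈ t, pvDist dp m ≤ pvDist dp c := fun c hc => hle c (htp c hc).1
  rw [pvFirstIdx_keys]
  have hpw : (PySem.List.sorted (PySem.Set.ofList (c0 :: rest)) (fun x => x)).Pairwise (· < ·) :=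
    PySem.List.sorted_ofList_pairwise_lt (c0 :: rest)
  set vals := PySem.List.sorted (PySem.Set.ofList (c0 :: rest)) (fun x => x) with hv
  have hperm : vals.Perm (PySem.Set.ofList (c0 :: rest)) := PySem.List.sorted_perm _ _ _
  have hmemv : ∀ x : Int, x ∈ vals ↔ x ∈ PySem.Set.ofList (c0 :: rest) := fun x => hperm.mem_iff
  have hmono := List.pairwise_iff_getElem.mp hpw
  obtain ⟨hlo_le, hleft, hright⟩ := PySem.List.bisectLeft_spec vals dp (hpw.imp le_of_lt)
  have hvne : vals ≠ [] := by
    refine List.ne_nil_of_mem ((hmemv m).mpr ?_)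
    rw [hU']; simp
  show (PySem.List.min2? _ _ _).getD 0 = m
  set lo := PySem.List.bisectLeft vals dp with hlo
  set cands := (if lo < vals.length then [vals.getD lo 0] else []) ++
               (if 0 < lo then [vals.getD (lo - 1) 0] else []) with hcands
  have hgd : ∀ (j : Nat) (hj : j < vals.length), vals.getD j 0 = vals[j] := fun j hj =>
    List.getD_eq_getElem vals 0 hj
  have hmemD : ∀ (j : Nat), j < vals.length → vals.getD j 0 ∈ vals := by
    intro j hj
    rw [hgd j hj]
    exact List.getElem_mem hj
  have hsub : ∀ c ∈ cands, c ∈ PySem.Set.ofList (c0 :: rest) := by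
    intro c hc
    rw [hcands] at hc
    rcases List.mem_append.mp hc with hc | hc
    · split_ifs at hc with h1
      · rw [List.mem_singleton.mp hc]
        exact (hmemv _).mp (hmemD lo h1)
      · exact absurd hc (List.not_mem_nil)
    · split_ifs at hc with h1
      · rw [List.mem_singleton.mp hc]
        exact (hmemv _).mp (hmemD (lo - 1) (by omega))
      · exact absurd hc (List.not_mem_nil)
  have hcne : cands ≠ [] := by
    rw [hcands]
    rcases Nat.lt_or_ge lo vals.length with h1 | h1
    · simp [h1]
    · have hlen : 0 < vals.length := List.length_pos_iff.mpr hvne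
      have h2 : 0 < lo := by omega
      simp [h2]
  have hdom : ∀ c ∈ PySem.Set.ofList (c0 :: rest), c ∉ cands →
      ∃ a ∈ cands, (dp - a).natAbs < (dp - c).natAbs := by
    intro c hc hnc
    obtain ⟨j, hj, rfl⟩ := List.getElem_of_mem ((hmemv c).mpr hc)
    rcases Nat.lt_or_ge j lo with hjlo | hjlo
    · -- vals[j] < dp, candidate vals[lo-1] is closer
      have h0lo : 0 < lo := by omega
      have hlo1 : lo - 1 < vals.length := by omega
      have hcand : vals[lo - 1] ∈ cands := by
        rw [hcands]
        refine List.mem_append_right _ ?_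
        rw [if_pos h0lo, hgd (lo - 1) hlo1]
        exact List.mem_singleton.mpr rfl
      have hjne : j ≠ lo - 1 := by
        intro hje
        exact hnc (hje ▸ hcand)
      have hjlt : j < lo - 1 := by omega
      have h1 : vals[j] < vals[lo - 1] := hmono j (lo - 1) hj hlo1 hjlt
      have h2 : vals[lo - 1] < dp := hleft (lo - 1) hlo1 (by omega)
      exact ⟨vals[lo - 1], hcand, by omega⟩
    · -- dp ≤ vals[j], candidate vals[lo] is closer
      have hlt : lo < vals.length := by omega
      have hcand : vals[lo] ∈ cands := by
        rw [hcands]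
        refine List.mem_append_left _ ?_
        rw [if_pos hlt, hgd lo hlt]
        exact List.mem_singleton.mpr rfl
      have hjne : j ≠ lo := by
        intro hje
        exact hnc (hje ▸ hcand)
      have hjgt : lo < j := by omega
      have h1 : vals[lo] < vals[j] := hmono lo j hlt hj hjgt
      have h2 : dp ≤ vals[lo] := hright lo hlt (le_refl _)
      exact ⟨vals[lo], hcand, by omega⟩
  exact best_pick dp m (pvFirstIdx (c0 :: rest)) (PySem.Set.ofList (c0 :: rest))
    (PySem.Set.ofList p1) t hU' (fun x1 x x2 h => pvFirstIdx_getD (c0 :: rest) x1 x x2 h)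
    hS1f htf cands hcne hsub hdom

-- ---- initial dictionaries ----
theorem ins0_items : ∀ (l : List Int) (d : PySem.Dict Int Int) (V : List Int),
    d.items = V.map (fun c => (c, (0 : Int))) →
    (l.foldl (fun d c => d.insert c 0) d).items = (PySem.Set.update V l).map (fun c => (c, (0 : Int))) := by
  intro l
  induction l with
  | nil => intro d V h; simpa [PySem.Set.update] using h
  | cons c l ih =>
    intro d V h
    have hkeys : d.keys = V := by
      show d.items.map Prod.fst = V
      rw [h, List.map_map]
      have hid : (Prod.fst ∘ fun c : Int => (c, (0 : Int))) = id := rfl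
      rw [hid, List.map_id]
    by_cases hc : c ∈ V
    · have hcont : d.contains c = true := (PySem.Dict.contains_iff_mem_keys d c).mpr (hkeys ▸ hc)
      have hadd : PySem.Set.add V c = V := by
        simp [PySem.Set.add, hc]
      have hupd : PySem.Set.update V (c :: l) = PySem.Set.update V l := by
        simp [PySem.Set.update, hadd]
      rw [List.foldl_cons, hupd]
      apply ih
      rw [PySem.Dict.items_insert_of_contains d _ hcont, h, List.map_map]
      congr 1
      funext x
      by_cases hx : x = c <;> simp [hx]
    · have hcont : d.contains c = false := by
        rw [← Bool.not_eq_true]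
        intro hcon
        exact hc (hkeys ▸ (PySem.Dict.contains_iff_mem_keys d c).mp hcon)
      have hadd : PySem.Set.add V c = V ++ [c] := by
        simp [PySem.Set.add]
        intro hcon
        exact absurd hcon hc
      have hupd : PySem.Set.update V (c :: l) = PySem.Set.update (V ++ [c]) l := by
        simp [PySem.Set.update, hadd]
      rw [List.foldl_cons, hupd]
      apply ih
      rw [PySem.Dict.items_insert_of_not_contains d _ hcont, h]
      simp

theorem counts_init_eq (cg : List Int) :
    cg.foldl (fun d c => d.insert c (0 : Int)) PySem.Dict.empty =
      (PySem.Set.ofList cg).foldl (fun d c => d.insert c 0) PySem.Dict.empty := by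
  apply PySem.Dict.ext
  rw [ins0_items cg PySem.Dict.empty [] (by rfl),
      ins0_items (PySem.Set.ofList cg) PySem.Dict.empty [] (by rfl)]
  have h1 : PySem.Set.update [] cg = PySem.Set.ofList cg := rfl
  have h2 : PySem.Set.update [] (PySem.Set.ofList cg) = PySem.Set.ofList (PySem.Set.ofList cg) := rfl
  rw [h1, h2, set_ofList_nodup_eq _ (PySem.Set.nodup_ofList cg)]

theorem getD_foldl_insert_const {ν : Type} (v0 : ν) :
    ∀ (l : List Int) (d : PySem.Dict Int ν), (∀ x, d.getD x v0 = v0) →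
      ∀ c, (l.foldl (fun d c => d.insert c v0) d).getD c v0 = v0 := by
  intro l
  induction l with
  | nil => intro d h c; exact h c
  | cons a l ih =>
    intro d h c
    rw [List.foldl_cons]
    apply ih
    intro x
    rw [PySem.Dict.getD_insert]
    split_ifs with hx
    · rfl
    · exact h x

-- ---- the histogram fold keeps the two states in step ----
theorem fold_inv (cg : List Int) (vals : List Int) (fi : PySem.Dict Int Int)
    (hbc : ∀ dp, pvChoose vals fi dp = (pvScanA cg dp).1)
    (hd2 : ∀ dp, (pvScanA cg dp).2 = pvDist dp (pvScanA cg dp).1) :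
    ∀ (hist : List (Int × Int)) (odA : PySem.Dict Int (List Int)) (cdA sd cd : PySem.Dict Int Int),
      cdA = cd → (∀ c, (odA.getD c []).sum = sd.getD c 0) →
      (hist.foldl (fun (st : PySem.Dict Int (List Int) × PySem.Dict Int Int) p =>
          let mc := pvScanA cg p.1
          (st.1.insert mc.1 (st.1.getD mc.1 [] ++ [mc.2 * p.2]), st.2.modify mc.1 0 (· + p.2)))
        (odA, cdA)).2 =
      (hist.foldl (fun (st : PySem.Dict Int Int × PySem.Dict Int Int) p =>
          let best := pvChoose vals fi p.1
          (st.1.insert best (st.1.getD best 0 + pvDist p.1 best * p.2), st.2.modify best 0 (· + p.2)))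
        (sd, cd)).2 ∧
      ∀ c, ((hist.foldl (fun (st : PySem.Dict Int (List Int) × PySem.Dict Int Int) p =>
          let mc := pvScanA cg p.1
          (st.1.insert mc.1 (st.1.getD mc.1 [] ++ [mc.2 * p.2]), st.2.modify mc.1 0 (· + p.2)))
        (odA, cdA)).1.getD c []).sum =
      (hist.foldl (fun (st : PySem.Dict Int Int × PySem.Dict Int Int) p =>
          let best := pvChoose vals fi p.1
          (st.1.insert best (st.1.getD best 0 + pvDist p.1 best * p.2), st.2.modify best 0 (· + p.2)))
        (sd, cd)).1.getD c 0 := by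
  intro hist
  induction hist with
  | nil =>
    intro odA cdA sd cd h1 h2
    exact ⟨h1, h2⟩
  | cons p hist ih =>
    intro odA cdA sd cd h1 h2
    rw [List.foldl_cons, List.foldl_cons]
    apply ih
    · show cdA.modify (pvScanA cg p.1).1 0 (· + p.2) = cd.modify (pvChoose vals fi p.1) 0 (· + p.2)
      rw [h1, hbc p.1]
    · intro c
      show ((odA.insert (pvScanA cg p.1).1 (odA.getD (pvScanA cg p.1).1 [] ++ [(pvScanA cg p.1).2 * p.2])).getD c []).sum =
        (sd.insert (pvChoose vals fi p.1) (sd.getD (pvChoose vals fi p.1) 0 + pvDist p.1 (pvChoose vals fi p.1) * p.2)).getD c 0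
      rw [hbc p.1, PySem.Dict.getD_insert, PySem.Dict.getD_insert]
      split_ifs with hc
      · rw [List.sum_append, h2, hd2 p.1]
        simp
      · exact h2 c

theorem foldl_add_congr (g1 g2 : Int → Int) :
    ∀ (l : List Int) (s : Int), (∀ c ∈ l, g1 c = g2 c) →
      l.foldl (fun s c => s + g1 c) s = l.foldl (fun s c => s + g2 c) s := by
  intro l
  induction l with
  | nil => intro s _; rfl
  | cons c l ih =>
    intro s h
    rw [List.foldl_cons, List.foldl_cons, h c (by simp)]
    exact ih _ (fun x hx => h x (by simp [hx]))

-- ===== VERDICT (by name: the statement is the Claim_ definition above) =====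
theorem cluster_group_assign_data_points_spec : Claim_equal_cluster_group_assign_data_points := by
  intro cg hist mr _hdom hpre
  unfold Spec_cluster_group_assign_data_points
  cases cg with
  | nil =>
    have hh : hist = [] := by
      rcases hpre with h | h
      · exact h
      · exact absurd rfl h
    subst hh
    rfl
  | cons c0 rest =>
    have hbc : ∀ dp, pvChoose (PySem.List.sorted (pvFirstIdx (c0 :: rest)).keys (fun x => x)) (pvFirstIdx (c0 :: rest)) dp = (pvScanA (c0 :: rest) dp).1 :=
      chooseEq c0 rest
    have hd2 : ∀ dp, (pvScanA (c0 :: rest) dp).2 = pvDist dp (pvScanA (c0 :: rest) dp).1 := by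
      intro dp
      obtain ⟨p1, p2, _, h, _, _⟩ := scanA_spec dp c0 rest
      exact h
    have hcd0 : (c0 :: rest).foldl (fun d c => d.insert c (0 : Int)) PySem.Dict.empty =
        (pvFirstIdx (c0 :: rest)).keys.foldl (fun d c => d.insert c 0) PySem.Dict.empty := by
      rw [pvFirstIdx_keys]
      exact counts_init_eq _
    have hod0 : ∀ x, ((c0 :: rest).foldl (fun d c => d.insert c ([] : List Int)) PySem.Dict.empty).getD x [] = [] :=
      getD_foldl_insert_const [] (c0 :: rest) PySem.Dict.empty (fun x => PySem.Dict.getD_empty x [])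
    have hsd0 : ∀ x, ((pvFirstIdx (c0 :: rest)).keys.foldl (fun d c => d.insert c (0 : Int)) PySem.Dict.empty).getD x 0 = 0 :=
      getD_foldl_insert_const 0 _ PySem.Dict.empty (fun x => PySem.Dict.getD_empty x 0)
    have hsum0 : ∀ c, (((c0 :: rest).foldl (fun d c => d.insert c ([] : List Int)) PySem.Dict.empty).getD c []).sum =
        ((pvFirstIdx (c0 :: rest)).keys.foldl (fun d c => d.insert c (0 : Int)) PySem.Dict.empty).getD c 0 := by
      intro c
      rw [hod0 c, hsd0 c]
      rfl
    obtain ⟨h2, h1⟩ := fold_inv (c0 :: rest) (PySem.List.sorted (pvFirstIdx (c0 :: rest)).keys (fun x => x))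
      (pvFirstIdx (c0 :: rest)) hbc hd2 hist _ _ _ _ hcd0 hsum0
    show cluster_group_assign_data_points (c0 :: rest) hist mr = cluster_group_assign_data_points_alt (c0 :: rest) hist mr
    unfold cluster_group_assign_data_points cluster_group_assign_data_points_alt
    refine Prod.ext ?_ ?_
    · exact foldl_add_congr _ _ (c0 :: rest) 0 (fun c _ => h1 c)
    · exact congrArg PySem.Dict.items h2
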